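-- pv_equiv track=rewrite | github.com/MsMansiDhruv/Hackerrank-Solutions | Data-Structures/Array/MrXAndHisShots.py | solve
-- ===== SOURCE A (Python) =====
-- from bisect import bisect_left, bisect_right
--
-- def solve(shots, players):
--     low_list = []
--     high_list = []
--     count = sum = 0
--     for index in range(0,len(shots)):
--         low_list.append(shots[index][0])
--         high_list.append(shots[index][1])
--     low_list.sort()
--     high_list.sort()
--     for p in range(len(players)):
--         leftmost = bisect_left(high_list, players[p][0])
--         rightmost = bisect_right(low_list, players[p][1])
--         count = rightmost - leftmost
--         sum += count
--     return sum
-- ===== SOURCE B (Python) =====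
-- def solve(shots, players):
--     # Same totals as A's sort+bisect, by direct per-player counting over shots.
--     total = 0
--     for p0, p1 in players:
--         le = sum(1 for s in shots if s[0] <= p1)   # = bisect_right(sorted lows, p1)
--         lt = sum(1 for s in shots if s[1] < p0)    # = bisect_left(sorted highs, p0)
--         total += le - lt
--     return total
-- ===== Notes on version B (the rewrite author's own statement) =====
-- stated objective: alternative
-- what changed: Replaces the two built lists, two sorts and the binary searches by a direct two-count linear scan of the shots per player (count lows <= p1 minus count highs < p0), with no sorting at all.
import Mathlib
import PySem

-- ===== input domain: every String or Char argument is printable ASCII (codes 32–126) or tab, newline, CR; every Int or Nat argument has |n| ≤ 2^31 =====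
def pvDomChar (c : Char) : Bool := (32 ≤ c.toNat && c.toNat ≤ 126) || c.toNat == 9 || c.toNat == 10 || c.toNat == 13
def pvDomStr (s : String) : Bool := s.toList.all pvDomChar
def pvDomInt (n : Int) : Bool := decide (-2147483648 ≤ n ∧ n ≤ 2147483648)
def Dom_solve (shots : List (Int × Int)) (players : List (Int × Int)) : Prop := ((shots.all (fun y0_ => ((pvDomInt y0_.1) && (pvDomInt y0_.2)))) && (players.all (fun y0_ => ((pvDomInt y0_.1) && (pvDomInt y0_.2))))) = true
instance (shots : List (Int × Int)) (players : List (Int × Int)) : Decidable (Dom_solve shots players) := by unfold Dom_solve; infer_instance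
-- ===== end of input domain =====

-- B replaces A's list-building, sorting and binary searches by a direct per-player
-- two-count linear scan of the shots (alternative decomposition, no sort needed).


-- ===== PORT A =====
def solve (shots : List (Int × Int)) (players : List (Int × Int)) : Int :=
  let low_list := (PySem.List.pyRange 0 (PySem.List.len shots)).foldl
      (fun acc index => acc ++ [(PySem.List.pyGetD shots index (0, 0)).1]) []
  let high_list := (PySem.List.pyRange 0 (PySem.List.len shots)).foldl
      (fun acc index => acc ++ [(PySem.List.pyGetD shots index (0, 0)).2]) []
  let low_sorted := PySem.List.sorted low_list (fun x => x)
  let high_sorted := PySem.List.sorted high_list (fun x => x)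
  (PySem.List.pyRange 0 (PySem.List.len players)).foldl
    (fun sum p =>
      let leftmost := PySem.List.bisectLeft high_sorted (PySem.List.pyGetD players p (0, 0)).1
      let rightmost := PySem.List.bisectRight low_sorted (PySem.List.pyGetD players p (0, 0)).2
      sum + ((rightmost : Int) - (leftmost : Int))) 0

-- ===== PORT B =====
def solve_alt (shots : List (Int × Int)) (players : List (Int × Int)) : Int :=
  players.foldl
    (fun total p =>
      let le := shots.countP (fun s => decide (s.1 ≤ p.2))
      let lt := shots.countP (fun s => decide (s.2 < p.1))
      total + ((le : Int) - (lt : Int))) 0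

-- ===== PRECONDITION & SPEC =====
def Spec_solve (shots : List (Int × Int)) (players : List (Int × Int)) (out : Int) : Prop := out = solve_alt shots players
instance (shots : List (Int × Int)) (players : List (Int × Int)) (out : Int) : Decidable (Spec_solve shots players out) := by unfold Spec_solve; infer_instance

-- ===== CLAIM (what is proved, stated in full; the proofs are below) =====
def Claim_equal_solve : Prop := ∀ (shots : List (Int × Int)) (players : List (Int × Int)), Dom_solve shots players → Spec_solve shots players (solve shots players)

-- ===== LEMMAS AND PROOFS =====

-- On a sorted (≤) list, bisect_left x is the number of elements < x.
theorem bisectLeft_eq_countP (s : List Int) (x : Int)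
    (hs : s.Pairwise (fun a b => a ≤ b)) :
    PySem.List.bisectLeft s x = s.countP (fun a => decide (a < x)) := by
  obtain ⟨hk, hlt, hge⟩ := PySem.List.bisectLeft_spec s x hs
  set k := PySem.List.bisectLeft s x with hkdef
  have h1 : (s.take k).countP (fun a => decide (a < x)) = (s.take k).length := by
    apply List.countP_eq_length.mpr
    intro a ha
    obtain ⟨j, hj, rfl⟩ := List.getElem_of_mem ha
    have hjlen : j < s.length := lt_of_lt_of_le hj (by simp)
    have hjk : j < k := lt_of_lt_of_le hj (by simp [List.length_take])
    have := hlt j hjlen hjk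
    simpa [List.getElem_take] using this
  have h2 : (s.drop k).countP (fun a => decide (a < x)) = 0 := by
    apply List.countP_eq_zero.mpr
    intro a ha
    obtain ⟨j, hj, rfl⟩ := List.getElem_of_mem ha
    have hjlen : k + j < s.length := by simp [List.length_drop] at hj; omega
    have := hge (k + j) hjlen (Nat.le_add_right _ _)
    simp [List.getElem_drop]
    omega
  calc k = (s.take k).length := by simp [List.length_take]; omega
    _ = (s.take k).countP (fun a => decide (a < x)) + (s.drop k).countP (fun a => decide (a < x)) := by
          rw [h1, h2]; omega
    _ = s.countP (fun a => decide (a < x)) := by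
          rw [← List.countP_append, List.take_append_drop]

-- On a sorted (≤) list, bisect_right x is the number of elements ≤ x.
theorem bisectRight_eq_countP (s : List Int) (x : Int)
    (hs : s.Pairwise (fun a b => a ≤ b)) :
    PySem.List.bisectRight s x = s.countP (fun a => decide (a ≤ x)) := by
  obtain ⟨hk, hle, hgt⟩ := PySem.List.bisectRight_spec s x hs
  set k := PySem.List.bisectRight s x with hkdef
  have h1 : (s.take k).countP (fun a => decide (a ≤ x)) = (s.take k).length := by
    apply List.countP_eq_length.mpr
    intro a ha
    obtain ⟨j, hj, rfl⟩ := List.getElem_of_mem ha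
    have hjlen : j < s.length := lt_of_lt_of_le hj (by simp)
    have hjk : j < k := lt_of_lt_of_le hj (by simp [List.length_take])
    have := hle j hjlen hjk
    simpa [List.getElem_take] using this
  have h2 : (s.drop k).countP (fun a => decide (a ≤ x)) = 0 := by
    apply List.countP_eq_zero.mpr
    intro a ha
    obtain ⟨j, hj, rfl⟩ := List.getElem_of_mem ha
    have hjlen : k + j < s.length := by simp [List.length_drop] at hj; omega
    have := hgt (k + j) hjlen (Nat.le_add_right _ _)
    simp [List.getElem_drop]
    omega
  calc k = (s.take k).length := by simp [List.length_take]; omega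
    _ = (s.take k).countP (fun a => decide (a ≤ x)) + (s.drop k).countP (fun a => decide (a ≤ x)) := by
          rw [h1, h2]; omega
    _ = s.countP (fun a => decide (a ≤ x)) := by
          rw [← List.countP_append, List.take_append_drop]

-- A's appending loop over range(len(shots)) builds exactly the projection map.
theorem buildList_eq_map (shots : List (Int × Int)) (f : Int × Int → Int) :
    (PySem.List.pyRange 0 (PySem.List.len shots)).foldl
      (fun acc index => acc ++ [f (PySem.List.pyGetD shots index (0, 0))]) []
      = shots.map f := by
  rw [PySem.List.foldl_pyRange_pyGetD shots (0, 0) (fun acc a => acc ++ [f a]) [] (by norm_num)]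
  simp only [Int.toNat_zero, List.drop_zero]
  rw [PySem.List.foldl_append_eq_flatMap]
  induction shots with
  | nil => rfl
  | cons h t ih => simpa using ih

-- ===== VERDICT (by name: the statement is the Claim_ definition above) =====
theorem solve_spec : Claim_equal_solve := by
  intro shots players _
  unfold Spec_solve
  have hA : solve shots players =
      players.foldl (fun sum p =>
        sum + ((PySem.List.bisectRight (PySem.List.sorted (shots.map Prod.fst) (fun x => x)) p.2 : Int)
             - (PySem.List.bisectLeft (PySem.List.sorted (shots.map Prod.snd) (fun x => x)) p.1 : Int))) 0 := by
    unfold solve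
    rw [buildList_eq_map shots Prod.fst, buildList_eq_map shots Prod.snd]
    exact PySem.List.foldl_pyRange_pyGetD players (0, 0)
      (fun (sum : Int) q =>
        sum + ((PySem.List.bisectRight (PySem.List.sorted (shots.map Prod.fst) (fun x => x)) q.2 : Int)
             - (PySem.List.bisectLeft (PySem.List.sorted (shots.map Prod.snd) (fun x => x)) q.1 : Int)))
      0 le_rfl
  rw [hA]
  unfold solve_alt
  congr 1
  funext sum p
  have hlperm := PySem.List.sorted_perm (shots.map Prod.fst) (fun x => x) false
  have hhperm := PySem.List.sorted_perm (shots.map Prod.snd) (fun x => x) false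
  have hlpw : (PySem.List.sorted (shots.map Prod.fst) (fun x => x) false).Pairwise
      (fun a b => a ≤ b) := by
    have := PySem.List.sorted_pairwise (shots.map Prod.fst) (fun x => x)
    simpa using this
  have hhpw : (PySem.List.sorted (shots.map Prod.snd) (fun x => x) false).Pairwise
      (fun a b => a ≤ b) := by
    have := PySem.List.sorted_pairwise (shots.map Prod.snd) (fun x => x)
    simpa using this
  rw [bisectRight_eq_countP _ _ hlpw, bisectLeft_eq_countP _ _ hhpw,
      hlperm.countP_eq, hhperm.countP_eq, List.countP_map, List.countP_map]
  rfl
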